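-- pv_equiv track=rewrite | github.com/ErlonBarbosa/Atividade_Python_Dicionario | questao6.py | cont_vogais
-- ===== SOURCE A (Python) =====
-- def cont_vogais(texto):
--     vogais = 'aeiouAEIOU'
--     contador_vogais = {}
--
--     for letra in texto:
--         if letra in vogais:
--             if letra in contador_vogais:
--                 contador_vogais[letra] += 1
--             else:
--                 contador_vogais[letra] = 1
--
--     return contador_vogais
-- ===== SOURCE B (Python) =====
-- def cont_vogais(texto):
--     vistos = []
--     for ch in texto:
--         if ch in 'aeiouAEIOU' and ch not in vistos:
--             vistos.append(ch)
--     return {v: sum(1 for ch in texto if ch == v) for v in vistos}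
-- ===== Notes on version B (the rewrite author's own statement) =====
-- stated objective: alternative
-- what changed: Instead of maintaining a running counter dict in one pass, B first collects the distinct vowels in first-occurrence order and then builds the result with a dict comprehension counting each such vowel by a scan of the text.
import Mathlib
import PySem

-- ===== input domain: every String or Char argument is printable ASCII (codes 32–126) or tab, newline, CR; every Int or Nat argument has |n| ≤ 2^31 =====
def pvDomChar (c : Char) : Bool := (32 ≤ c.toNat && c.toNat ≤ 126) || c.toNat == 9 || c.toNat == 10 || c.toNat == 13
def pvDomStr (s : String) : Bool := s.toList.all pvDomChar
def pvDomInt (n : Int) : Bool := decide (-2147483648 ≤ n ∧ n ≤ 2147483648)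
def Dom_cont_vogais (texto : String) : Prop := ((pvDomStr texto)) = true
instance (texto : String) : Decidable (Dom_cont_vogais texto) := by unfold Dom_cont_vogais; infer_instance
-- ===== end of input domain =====

-- B replaces A's single-pass running-counter dict by a distinct-vowel collection pass followed by
-- one counting scan per distinct vowel (alternative decomposition; same return value).

-- ===== PORT A =====
-- 'letra in vogais' tests a 1-character string for substring membership in 'aeiouAEIOU';
-- for a single character this is exactly list membership of the character, used here.
def cont_vogais (texto : String) : List (String × Int) :=
  (texto.toList.foldl (fun contador letra =>
    if letra ∈ "aeiouAEIOU".toList then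
      match contador.get? (String.ofList [letra]) with
      | some n => contador.insert (String.ofList [letra]) (n + 1)
      | none   => contador.insert (String.ofList [letra]) 1
    else contador) (PySem.Dict.empty : PySem.Dict String Int)).items

-- ===== PORT B =====
def cont_vogais_alt (texto : String) : List (String × Int) :=
  let vistos := texto.toList.foldl (fun vs ch =>
    if ch ∈ "aeiouAEIOU".toList ∧ ch ∉ vs then vs ++ [ch] else vs) ([] : List Char)
  vistos.map (fun v =>
    (String.ofList [v], texto.toList.foldl (fun acc ch => if ch == v then acc + 1 else acc) (0 : Int)))

-- ===== PRECONDITION & SPEC =====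
def Spec_cont_vogais (texto : String) (out : List (String × Int)) : Prop := out = cont_vogais_alt texto
instance (texto : String) (out : List (String × Int)) : Decidable (Spec_cont_vogais texto out) := by unfold Spec_cont_vogais; infer_instance

-- ===== CLAIM (what is proved, stated in full; the proofs are below) =====
def Claim_equal_cont_vogais : Prop := ∀ (texto : String), Dom_cont_vogais texto → Spec_cont_vogais texto (cont_vogais texto)

-- ===== LEMMAS AND PROOFS =====

-- the single-character key map, injective
theorem pv_mk1_injective : Function.Injective (fun c => String.ofList [c]) := by
  intro a b h
  have := congrArg String.toList h
  simpa using this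

-- PySem.Set.ofList commutes with mapping an injective function
theorem pv_ofList_map (f : Char → String) (hf : Function.Injective f) (xs : List Char) :
    PySem.Set.ofList (xs.map f) = (PySem.Set.ofList xs).map f := by
  have key : ∀ (ys : List Char) (acc : List Char),
      (ys.map f).foldl PySem.Set.add (acc.map f) = (ys.foldl PySem.Set.add acc).map f := by
    intro ys
    induction ys with
    | nil => intro acc; rfl
    | cons a t ih =>
      intro acc
      have hadd : PySem.Set.add (acc.map f) (f a) = (PySem.Set.add acc a).map f := by
        by_cases hmem : a ∈ acc
        · simp [PySem.Set.add, hmem, List.mem_map.mpr ⟨a, hmem, rfl⟩]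
        · have : f a ∉ acc.map f := by
            intro hc
            rcases List.mem_map.mp hc with ⟨b, hb, hba⟩
            exact hmem (hf hba ▸ hb)
          simp [PySem.Set.add, hmem, this]
      simpa [hadd] using ih (PySem.Set.add acc a)
  simpa using key xs []

-- Prop-guarded variant of the filter/foldl exchange
theorem pv_foldl_guardP {α β : Type} (l : List α) (p : α → Prop) [DecidablePred p]
    (f : β → α → β) (i : β) :
    l.foldl (fun x y => if p y then f x y else x) i
      = (l.filter (fun y => decide (p y))).foldl f i := by
  induction l generalizing i with
  | nil => rfl
  | cons a t ih => by_cases h : p a <;> simp [h, ih]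

-- ===== VERDICT (by name: the statement is the Claim_ definition above) =====
theorem cont_vogais_spec : Claim_equal_cont_vogais := by
  intro texto _
  unfold Spec_cont_vogais cont_vogais cont_vogais_alt
  simp only []
  set l := texto.toList with hl
  set Φ := l.filter (fun c => decide (c ∈ "aeiouAEIOU".toList)) with hΦ
  -- A's loop is the counter of the vowel-filtered, key-mapped list
  have hbodyA : (fun (contador : PySem.Dict String Int) letra =>
      if letra ∈ "aeiouAEIOU".toList then
        match contador.get? (String.ofList [letra]) with
        | some n => contador.insert (String.ofList [letra]) (n + 1)
        | none   => contador.insert (String.ofList [letra]) 1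
      else contador)
      = (fun (contador : PySem.Dict String Int) letra =>
        if letra ∈ "aeiouAEIOU".toList then
          contador.insert (String.ofList [letra])
            (contador.getD (String.ofList [letra]) 0 + 1)
        else contador) := by
    funext d c
    by_cases h : c ∈ "aeiouAEIOU".toList
    · rw [if_pos h, if_pos h]
      cases hg : d.get? (String.ofList [c]) with
      | some n => simp [PySem.Dict.getD_eq_get?_getD, hg]
      | none => simp [PySem.Dict.getD_eq_get?_getD, hg]
    · rw [if_neg h, if_neg h]
  rw [hbodyA, pv_foldl_guardP l (fun c => c ∈ "aeiouAEIOU".toList), ← hΦ]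
  rw [show (Φ.foldl (fun (d : PySem.Dict String Int) c =>
        d.insert (String.ofList [c]) (d.getD (String.ofList [c]) 0 + 1)) PySem.Dict.empty)
      = ((Φ.map (fun c => String.ofList [c])).foldl
          (fun (d : PySem.Dict String Int) x => d.insert x (d.getD x 0 + 1)) PySem.Dict.empty)
    from (@List.foldl_map _ _ _ (fun c => String.ofList [c])
      (fun (d : PySem.Dict String Int) x => d.insert x (d.getD x 0 + 1)) Φ PySem.Dict.empty).symm]
  rw [PySem.Dict.foldl_insert_getD_add_one_eq_counter, PySem.Dict.items_counter]
  -- B's first loop collects the distinct vowels in first-occurrence order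
  have hbodyB : (fun (vs : List Char) ch =>
      if ch ∈ "aeiouAEIOU".toList ∧ ch ∉ vs then vs ++ [ch] else vs)
      = (fun (vs : List Char) ch =>
        if ch ∈ "aeiouAEIOU".toList then PySem.Set.add vs ch else vs) := by
    funext vs c
    by_cases h : c ∈ "aeiouAEIOU".toList
    · by_cases hm : c ∈ vs
      · rw [if_neg (fun hc => hc.2 hm), if_pos h]
        simp [PySem.Set.add, hm]
      · rw [if_pos ⟨h, hm⟩, if_pos h]
        simp [PySem.Set.add, hm]
    · rw [if_neg (fun hc => h hc.1), if_neg h]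
  rw [hbodyB, pv_foldl_guardP l (fun c => c ∈ "aeiouAEIOU".toList), ← hΦ]
  rw [show (Φ.foldl PySem.Set.add ([] : List Char)) = PySem.Set.ofList Φ from rfl]
  -- now both sides are maps over the same distinct-vowel list
  rw [pv_ofList_map _ pv_mk1_injective, List.map_map]
  apply List.map_congr_left
  intro v hv
  have hvΦ : v ∈ Φ := (PySem.Set.mem_ofList _ _).mp hv
  have hvow : v ∈ "aeiouAEIOU".toList := by
    have := List.of_mem_filter hvΦ
    simpa using this
  have hcnt : (Φ.map (fun c => String.ofList [c])).count (String.ofList [v]) = l.count v := by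
    rw [List.count_map_of_injective Φ _ pv_mk1_injective v]
    rw [hΦ, List.count_filter (by simpa using hvow)]
  simp only [Function.comp]
  rw [PySem.List.foldl_beq_add_one]
  rw [hcnt]
  simp
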